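-- pv_equiv track=rewrite | github.com/natebottman/complex-2associahedra | VP_of_2Mn-bar.py | twoparts_fused
-- ===== SOURCE A (Python) =====
-- def twoparts_fused(twonums):
--     # Idea: consider a single witch ball, and suppose that all seams fuse.
--     # How can marked points distribute themselves?
--     #
--     # Takes in a dictionary of the form eg {1:[a,b],2:[c]}, where the
--     # keys are the seam labels and the values are the marked points.
--     # Returns a list of lists of dicts, eg [{1:[a],2:[]},{1:[b],2:[c]}].
--
--     nums = twonums.keys()
--     num_pts = sum([len(val) for val in twonums.values()])
--     if num_pts == 0:
--         return [[]]
--     elif num_pts >= 1: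
--         i = [j for j in nums if len(twonums[j]) >= 1][0]
--         pt = twonums[i][-1]
--         smaller = {k: (v[:-1] if k == i else v)
--                    for k, v in twonums.items()}
--         small_twoparts = twoparts_fused(smaller)
--         return [[{k: (v+[pt] if (k, bub) == (i, bub0) else v)
--                   for k, v in bub.items()}
--                  for bub in twopart]
--                 for twopart in small_twoparts for bub0 in twopart] \
--             + [twopart + [{k: ([pt] if k == i else [])
--                           for k in nums}]
--                for twopart in small_twoparts]
-- ===== SOURCE B (Python) =====
-- def twoparts_fused(twonums):
--     # Iterative fold: flatten the points into the order the recursion inserts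
--     # them (reversed keys, each seam forward) and grow the partition list.
--     keys = list(twonums)
--
--     def add_pt(bub, i, pt):
--         return {k: v + [pt] if k == i else v for k, v in bub.items()}
--
--     def new_bubble(i, pt):
--         return {k: [pt] if k == i else [] for k in keys}
--
--     result = [[]]
--     for i in reversed(keys):
--         for pt in twonums[i]:
--             grown = [[add_pt(bub, i, pt) if bub == bub0 else bub for bub in tp]
--                      for tp in result for bub0 in tp]
--             result = grown + [tp + [new_bubble(i, pt)] for tp in result]
--     return result
-- ===== Notes on version B (the rewrite author's own statement) =====
-- stated objective: alternative
-- what changed: Replaces the recursion (which rebuilds a smaller dict each level and recurses until empty) by an iterative fold: the points are flattened once into the insertion order the recursion effectively uses (reversed keys, each seam forward) and the list of partitions is grown in an explicit accumulator loop.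
import Mathlib
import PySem

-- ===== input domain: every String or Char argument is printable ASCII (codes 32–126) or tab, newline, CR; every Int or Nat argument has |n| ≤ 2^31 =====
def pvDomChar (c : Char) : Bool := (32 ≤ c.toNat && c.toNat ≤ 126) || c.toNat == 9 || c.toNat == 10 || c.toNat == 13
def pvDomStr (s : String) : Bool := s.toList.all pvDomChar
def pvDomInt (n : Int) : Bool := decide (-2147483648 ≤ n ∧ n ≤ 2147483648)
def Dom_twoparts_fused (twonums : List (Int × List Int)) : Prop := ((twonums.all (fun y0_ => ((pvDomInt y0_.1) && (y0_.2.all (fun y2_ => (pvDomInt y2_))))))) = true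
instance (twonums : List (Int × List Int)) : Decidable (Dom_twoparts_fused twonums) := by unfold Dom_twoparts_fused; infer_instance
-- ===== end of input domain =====

-- B replaces A's recursion (which rebuilds a smaller dict each level) by one iterative
-- fold over the points flattened into the recursion's insertion order; same output list.

-- ===== PORT A =====
-- dict lookup twonums[j] (first match; exact for dict-as-association-list semantics)
def pvLookup (t : List (Int × List Int)) (i : Int) : List Int :=
  ((t.find? (fun kv => kv.1 == i)).map (·.2)).getD []

-- num_pts = sum([len(val) for val in twonums.values()])
def pvNumPts (t : List (Int × List Int)) : Nat := (t.map (fun kv => kv.2.length)).sum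

-- used by the port's decreasing_by (the recursive call strictly shrinks the point count)
theorem pvNumPts_map_le (t : List (Int × List Int)) (i : Int) :
    pvNumPts (t.map (fun kv => if kv.1 == i then (kv.1, kv.2.dropLast) else kv)) ≤ pvNumPts t := by
  induction t with
  | nil => simp [pvNumPts]
  | cons b rs ih2 =>
    simp only [pvNumPts, List.map_cons, List.sum_cons] at *
    have : (if b.1 == i then (b.1, b.2.dropLast) else b).2.length ≤ b.2.length := by
      split <;> simp [List.length_dropLast]
    omega

theorem pvNumPts_smaller_lt (t : List (Int × List Int)) (i : Int)
    (h : 1 ≤ (pvLookup t i).length) :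
    pvNumPts (t.map (fun kv => if kv.1 == i then (kv.1, kv.2.dropLast) else kv)) < pvNumPts t := by
  induction t with
  | nil => simp [pvLookup] at h
  | cons a rest ih =>
    by_cases hk : (a.1 == i) = true
    · have hv : pvLookup (a :: rest) i = a.2 := by
        simp [pvLookup, List.find?, hk]
      rw [hv] at h
      have hlt : a.2.dropLast.length < a.2.length := by
        rw [List.length_dropLast]; omega
      have hle : pvNumPts (rest.map (fun kv => if kv.1 == i then (kv.1, kv.2.dropLast) else kv))
          ≤ pvNumPts rest := pvNumPts_map_le rest i
      simp only [pvNumPts, List.map_cons, List.sum_cons, hk, if_pos] at *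
      omega
    · have hv : pvLookup (a :: rest) i = pvLookup rest i := by
        simp [pvLookup, List.find?, hk]
      rw [hv] at h
      have := ih h
      simp only [pvNumPts, List.map_cons, List.sum_cons, hk, if_neg, Bool.false_eq_true,
        not_false_iff] at *
      omega

-- literal port of A's recursion
def twoparts_fused (twonums : List (Int × List Int)) : List (List (List (Int × List Int))) :=
  let nums := twonums.map (·.1)
  if pvNumPts twonums = 0 then [[]]
  else
    match hfind : (nums.filter (fun j => 1 ≤ (pvLookup twonums j).length)).head? with
    | none => []   -- Python raises IndexError here; only reachable with duplicate keys, excluded by Pre_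
    | some i =>
      let pt := PySem.List.pyGetD (pvLookup twonums i) (-1) 0   -- twonums[i][-1]
      let smaller := twonums.map (fun kv => if kv.1 == i then (kv.1, kv.2.dropLast) else kv)
      let small := twoparts_fused smaller
      (small.flatMap (fun tp => tp.map (fun bub0 =>
          tp.map (fun bub => bub.map (fun kv =>
            if kv.1 == i && bub == bub0 then (kv.1, kv.2 ++ [pt]) else kv)))))
      ++ small.map (fun tp => tp ++ [nums.map (fun k => (k, if k == i then [pt] else []))])
termination_by pvNumPts twonums
decreasing_by
  simp only [List.map_attach_eq_pmap, List.pmap_eq_map] at hfind ⊢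
  have hmem := List.mem_of_mem_head? (Option.mem_def.mpr hfind)
  have h1 : 1 ≤ (pvLookup twonums i).length := by
    have := List.of_mem_filter hmem
    simpa using this
  simpa using pvNumPts_smaller_lt twonums i h1

-- ===== PORT B =====
-- add_pt(bub, i, pt)
def pvAddPt (bub : List (Int × List Int)) (i pt : Int) : List (Int × List Int) :=
  bub.map (fun kv => if kv.1 == i then (kv.1, kv.2 ++ [pt]) else kv)

-- new_bubble(i, pt)
def pvNewBubble (keys : List Int) (i pt : Int) : List (Int × List Int) :=
  keys.map (fun k => (k, if k == i then [pt] else []))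

-- one step of the loop body: result = grown + fresh
def pvStep (keys : List Int) (i pt : Int) (result : List (List (List (Int × List Int)))) :
    List (List (List (Int × List Int))) :=
  (result.flatMap (fun tp => tp.map (fun bub0 =>
      tp.map (fun bub => if bub == bub0 then pvAddPt bub i pt else bub))))
  ++ result.map (fun tp => tp ++ [pvNewBubble keys i pt])

-- literal port of B: fold over reversed keys, then over each seam's points
def twoparts_fused_alt (twonums : List (Int × List Int)) : List (List (List (Int × List Int))) :=
  let keys := twonums.map (·.1)
  keys.reverse.foldl
    (fun res i => (pvLookup twonums i).foldl (fun res pt => pvStep keys i pt res) res)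
    [[]]

-- ===== PRECONDITION & SPEC =====
-- Python dicts have unique keys, so requiring distinct keys excludes no input A accepts;
-- on duplicate-key association lists the two ports are not about any Python behaviour.
def Pre_twoparts_fused (twonums : List (Int × List Int)) : Prop :=
  (twonums.map Prod.fst).Nodup
instance (twonums : List (Int × List Int)) : Decidable (Pre_twoparts_fused twonums) := by
  unfold Pre_twoparts_fused; infer_instance

def pvWitness_twoparts_fused : (List (Int × List Int)) := [(1, [5, 6]), (2, [7])]

def Spec_twoparts_fused (twonums : List (Int × List Int)) (out : List (List (List (Int × List Int)))) : Prop := out = twoparts_fused_alt twonums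
instance (twonums : List (Int × List Int)) (out : List (List (List (Int × List Int)))) : Decidable (Spec_twoparts_fused twonums out) := by unfold Spec_twoparts_fused; infer_instance

-- ===== CLAIM (what is proved, stated in full; the proofs are below) =====
def Claim_equal_twoparts_fused : Prop := ∀ (twonums : List (Int × List Int)), Dom_twoparts_fused twonums → Pre_twoparts_fused twonums → Spec_twoparts_fused twonums (twoparts_fused twonums)

-- ===== LEMMAS AND PROOFS =====

-- the points flattened into B's iteration order
def pvOrder (t : List (Int × List Int)) : List (Int × Int) :=
  t.reverse.flatMap (fun kv => kv.2.map (fun p => (kv.1, p)))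

theorem pvLookup_of_mem (t : List (Int × List Int)) (hnd : (t.map Prod.fst).Nodup)
    {kv : Int × List Int} (hm : kv ∈ t) : pvLookup t kv.1 = kv.2 := by
  induction t with
  | nil => simp at hm
  | cons a rest ih =>
    rcases List.mem_cons.mp hm with rfl | hm
    · simp [pvLookup, List.find?]
    · have hne : (a.1 == kv.1) = false := by
        simp only [List.map_cons, List.nodup_cons] at hnd
        have : kv.1 ∈ rest.map Prod.fst := List.mem_map_of_mem hm
        simp only [beq_eq_false_iff_ne, ne_eq]
        intro he; exact hnd.1 (he ▸ this)
      have := ih (by simp only [List.map_cons, List.nodup_cons] at hnd; exact hnd.2) hm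
      simpa [pvLookup, List.find?, hne] using this

-- B equals the fold of pvStep over pvOrder
theorem alt_eq_fold (t : List (Int × List Int)) (hnd : (t.map Prod.fst).Nodup) :
    twoparts_fused_alt t =
      (pvOrder t).foldl (fun res ip => pvStep (t.map (·.1)) ip.1 ip.2 res) [[]] := by
  have h1 : twoparts_fused_alt t = (t.map (fun x => x.1)).reverse.foldl
      (fun res i => (pvLookup t i).foldl (fun res pt => pvStep (t.map (fun x => x.1)) i pt res) res)
      [[]] := rfl
  rw [h1, pvOrder, List.foldl_flatMap, ← List.map_reverse, List.foldl_map]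
  apply PySem.List.foldl_congr_mem
  intro acc kv hkv
  rw [List.foldl_map, pvLookup_of_mem t hnd (List.mem_reverse.mp hkv)]

theorem pvNumPts_eq_zero_iff (t : List (Int × List Int)) :
    pvNumPts t = 0 ↔ ∀ kv ∈ t, kv.2 = [] := by
  unfold pvNumPts
  rw [List.sum_eq_zero_iff]
  constructor
  · intro h kv hkv
    have := h kv.2.length (List.mem_map_of_mem hkv)
    simpa [List.length_eq_zero_iff] using this
  · intro h x hx
    obtain ⟨kv, hkv, rfl⟩ := List.mem_map.mp hx
    simp [h kv hkv]

-- A equals the same fold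
theorem a_eq_fold (n : Nat) : ∀ (t : List (Int × List Int)), pvNumPts t = n →
    (t.map Prod.fst).Nodup →
    twoparts_fused t =
      (pvOrder t).foldl (fun res ip => pvStep (t.map (·.1)) ip.1 ip.2 res) [[]] := by
  induction n using Nat.strong_induction_on with
  | _ n ih =>
  intro t hn hnd
  by_cases h0 : pvNumPts t = 0
  · -- no points: both sides are [[]]
    have hall := (pvNumPts_eq_zero_iff t).mp h0
    have horder : pvOrder t = [] := by
      unfold pvOrder
      rw [List.flatMap_eq_nil_iff]
      intro kv hkv
      simp [hall kv (List.mem_reverse.mp hkv)]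
    rw [horder, List.foldl_nil]
    rw [twoparts_fused.eq_def]
    simp [h0]
  · -- find the first item with a nonempty value and split t around it
    obtain ⟨kv0, hfd⟩ : ∃ kv0, t.find? (fun kv => decide (1 ≤ kv.2.length)) = some kv0 := by
      rw [← Option.isSome_iff_exists, List.find?_isSome]
      by_contra hc
      apply h0
      apply (pvNumPts_eq_zero_iff t).mpr
      intro kv hkv
      have hlen : ¬ (1 ≤ kv.2.length) := by
        intro hge
        exact hc ⟨kv, hkv, by simpa using hge⟩
      exact List.eq_nil_of_length_eq_zero (by omega)
    obtain ⟨hq0, pre, post, ht, hpre⟩ := List.find?_eq_some_iff_append.mp hfd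
    have hv : kv0.2 ≠ [] := by
      simp only [decide_eq_true_eq] at hq0
      intro hc; rw [hc] at hq0; simp at hq0
    have hpre' : ∀ a ∈ pre, a.2 = [] := by
      intro a ha
      have := hpre a ha
      simp only [Bool.not_eq_eq_eq_not, Bool.not_true, decide_eq_false_iff_not] at this
      rcases List.eq_nil_or_concat a.2 with h | ⟨l, x, h⟩
      · exact h
      · exfalso; apply this; rw [h]; simp
    have hkey : (∀ a ∈ pre, a.1 ≠ kv0.1) ∧ (∀ a ∈ post, a.1 ≠ kv0.1) := by
      rw [ht, List.map_append, List.nodup_append] at hnd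
      obtain ⟨-, hcons, hdisj⟩ := hnd
      constructor
      · intro a ha
        exact hdisj a.1 (List.mem_map_of_mem ha) kv0.1 (by simp)
      · intro a ha
        simp only [List.map_cons, List.nodup_cons] at hcons
        intro he
        exact hcons.1 (he ▸ List.mem_map_of_mem ha)
    have hmem0 : kv0 ∈ t := by rw [ht]; simp
    have hlk : pvLookup t kv0.1 = kv0.2 := pvLookup_of_mem t hnd hmem0
    -- the head of A's filtered key list is kv0's key
    have hhead : ((t.map (·.1)).filter (fun j => decide (1 ≤ (pvLookup t j).length))).head?
        = some kv0.1 := by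
      rw [List.filter_map]
      rw [List.filter_congr (q := fun kv : Int × List Int => decide (1 ≤ kv.2.length))
        (by intro kv hkv; simp only [Function.comp]; rw [pvLookup_of_mem t hnd hkv])]
      rw [List.head?_map, List.head?_filter, hfd]
      rfl
    -- the smaller dict is t with kv0's last point removed
    have hsm : t.map (fun kv => if kv.1 == kv0.1 then (kv.1, kv.2.dropLast) else kv)
        = pre ++ (kv0.1, kv0.2.dropLast) :: post := by
      rw [ht, List.map_append, List.map_cons]
      congr 1
      · rw [List.map_congr_left (g := id)
          (by intro a ha; simp [(hkey.1 a ha)]), List.map_id]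
      · congr 1
        · simp
        · rw [List.map_congr_left (g := id)
            (by intro a ha; simp [(hkey.2 a ha)]), List.map_id]
    have hpt : PySem.List.pyGetD (pvLookup t kv0.1) (-1) 0 = kv0.2.getLast hv := by
      rw [hlk]; exact PySem.List.pyGetD_neg_one kv0.2 0 hv
    -- point order: smaller's order plus the removed point
    have horder : pvOrder t
        = pvOrder (t.map (fun kv => if kv.1 == kv0.1 then (kv.1, kv.2.dropLast) else kv))
          ++ [(kv0.1, kv0.2.getLast hv)] := by
      rw [hsm]
      unfold pvOrder
      rw [ht]
      have hprenil : ∀ (g : Int × List Int → List (Int × Int)),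
          (∀ kv, g kv = kv.2.map (fun p => (kv.1, p))) → pre.reverse.flatMap g = [] := by
        intro g hg
        rw [List.flatMap_eq_nil_iff]
        intro kv hkv
        rw [hg kv]
        simp [hpre' kv (List.mem_reverse.mp hkv)]
      simp only [List.reverse_append, List.reverse_cons, List.flatMap_append,
        List.flatMap_cons, List.flatMap_nil]
      rw [hprenil _ (fun kv => rfl)]
      conv_lhs => rw [← List.dropLast_concat_getLast hv]
      simp [List.map_append, List.append_assoc]
    have hkeq : (t.map (fun kv => if kv.1 == kv0.1 then (kv.1, kv.2.dropLast) else kv)).map (·.1)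
        = t.map (·.1) := by
      rw [List.map_map]
      apply List.map_congr_left
      intro a _
      simp only [Function.comp]
      split <;> rfl
    have hlt : pvNumPts (t.map (fun kv => if kv.1 == kv0.1 then (kv.1, kv.2.dropLast) else kv)) < n :=
      hn ▸ pvNumPts_smaller_lt t kv0.1 (by rw [hlk]; rcases List.eq_nil_or_concat kv0.2 with h | ⟨l, x, h⟩
                                           · exact absurd h hv
                                           · rw [h]; simp)
    have hndsm : ((t.map (fun kv => if kv.1 == kv0.1 then (kv.1, kv.2.dropLast) else kv)).map Prod.fst).Nodup := by
      have : (t.map (fun kv => if kv.1 == kv0.1 then (kv.1, kv.2.dropLast) else kv)).map Prod.fst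
          = t.map Prod.fst := hkeq
      rw [this]; exact hnd
    have hsmall := ih _ hlt _ rfl hndsm
    -- assemble
    rw [horder, List.foldl_append, List.foldl_cons, List.foldl_nil]
    rw [hkeq] at hsmall
    rw [← hsmall]
    conv_lhs => rw [twoparts_fused.eq_def]
    simp only [h0, if_false]
    split
    · next heq => rw [hhead] at heq; exact absurd heq (by simp)
    · next i' heq =>
      rw [hhead] at heq
      have hi : i' = kv0.1 := by injection heq; omega
      subst hi
      rw [hpt]
      unfold pvStep
      congr 1
      · refine congrArg (fun F => List.flatMap F _) ?_
        funext tp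
        refine congrArg (fun G => List.map G tp) ?_
        funext bub0
        apply List.map_congr_left
        intro bub _
        by_cases hb : (bub == bub0) = true
        · rw [if_pos hb]
          unfold pvAddPt
          apply List.map_congr_left
          intro kv _
          simp [hb]
        · rw [if_neg hb]
          rw [List.map_congr_left (g := id) (by
            intro kv _
            simp [Bool.eq_false_iff.mp (Bool.not_eq_true _ ▸ hb)]), List.map_id]

-- ===== VERDICT (by name: the statement is the Claim_ definition above) =====
theorem twoparts_fused_spec : Claim_equal_twoparts_fused := by
  intro t _ hpre
  unfold Spec_twoparts_fused
  rw [alt_eq_fold t hpre, a_eq_fold (pvNumPts t) t rfl hpre]
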